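-- pv_equiv track=rewrite | github.com/joniumGit/dnsmule | src/dnsmule/utils/domains.py | spread_domain
-- ===== SOURCE A (Python) =====
-- from typing import Iterable
--
-- def spread_domain(domain: str) -> Iterable[str]:
--     """Spreads a domain into all valid super domains
--     """
--     parts = domain.strip().split('.')
--     if parts[0] == '*' or parts[0] == '':
--         parts = parts[1:]
--     if len(parts) > 2:
--         partial_domain = '.'.join(parts[-2:])
--         yield partial_domain
--         for i in range(-3, -len(parts) - 1, -1):
--             partial_domain = f'{parts[i]}.{partial_domain}'
--             yield partial_domain
--     elif len(parts) == 2: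
--         yield '.'.join(parts)
-- ===== SOURCE B (Python) =====
-- def spread_domain(domain):
--     """Spreads a domain into all valid super domains"""
--     parts = domain.strip().split('.')
--     if parts[0] == '*' or parts[0] == '':
--         parts = parts[1:]
--     for k in range(2, len(parts) + 1):
--         yield '.'.join(parts[-k:])
-- ===== Notes on version B (the rewrite author's own statement) =====
-- stated objective: simpler
-- what changed: The three-way branching (an incrementally-extended partial_domain accumulator for len>2, a len==2 special case, an implicit empty case) is replaced by one uniform loop that recomputes each suffix directly by joining the last k parts for k in range(2, len(parts)+1).
import Mathlib
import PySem

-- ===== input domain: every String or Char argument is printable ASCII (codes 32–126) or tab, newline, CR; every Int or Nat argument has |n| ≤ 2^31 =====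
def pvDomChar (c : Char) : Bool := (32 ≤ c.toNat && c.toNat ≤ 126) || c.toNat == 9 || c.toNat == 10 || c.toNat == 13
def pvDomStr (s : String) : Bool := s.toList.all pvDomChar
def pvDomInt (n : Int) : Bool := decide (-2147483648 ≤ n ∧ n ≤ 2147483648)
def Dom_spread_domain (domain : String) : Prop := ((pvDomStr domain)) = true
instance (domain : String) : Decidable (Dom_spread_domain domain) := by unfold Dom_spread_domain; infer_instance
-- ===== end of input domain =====

-- B replaces A's three-way branching and incrementally-extended accumulator by one uniform
-- slice-and-join loop over the suffix lengths (objective: simpler); same return value everywhere.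

-- ===== PORT A =====
-- the generator body after the shared 'parts' preprocessing (yields collected into a list)
def spreadDomainBodyA (parts : List (List Char)) : List String :=
  if 2 < parts.length then
    let pd0 := PySem.Chars.join ['.'] (PySem.List.slice parts (some (-2)) none)
    let st := (PySem.List.pyRange (-3) (-(parts.length : Int) - 1) (-1)).foldl
      (fun (st : List (List Char) × List Char) i =>
        -- parts[i]: i is always in range on this loop, so the default of pyGetD is never used
        let pd := PySem.List.pyGetD parts i [] ++ ['.'] ++ st.2
        (st.1 ++ [pd], pd)) ([pd0], pd0)
    st.1.map String.ofList
  else if parts.length = 2 then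
    [String.ofList (PySem.Chars.join ['.'] parts)]
  else []

def spread_domain (domain : String) : List String :=
  let parts0 := PySem.Chars.splitOn (PySem.Chars.strip domain.toList) ['.']
  match PySem.List.pyGet? parts0 0 with
  | none => []   -- unreachable: str.split('.') always returns a nonempty list
  | some p0 =>
    spreadDomainBodyA (if p0 = ['*'] ∨ p0 = [] then PySem.List.slice parts0 (some 1) none else parts0)

-- ===== PORT B =====
def spreadDomainBodyB (parts : List (List Char)) : List String :=
  (PySem.List.pyRange 2 ((parts.length : Int) + 1) 1).map
    (fun k => String.ofList (PySem.Chars.join ['.'] (PySem.List.slice parts (some (-k)) none)))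

def spread_domain_alt (domain : String) : List String :=
  let parts0 := PySem.Chars.splitOn (PySem.Chars.strip domain.toList) ['.']
  match PySem.List.pyGet? parts0 0 with
  | none => []   -- unreachable: str.split('.') always returns a nonempty list
  | some p0 =>
    spreadDomainBodyB (if p0 = ['*'] ∨ p0 = [] then PySem.List.slice parts0 (some 1) none else parts0)

-- ===== PRECONDITION & SPEC =====
def Spec_spread_domain (domain : String) (out : List String) : Prop := out = spread_domain_alt domain
instance (domain : String) (out : List String) : Decidable (Spec_spread_domain domain out) := by unfold Spec_spread_domain; infer_instance

-- ===== CLAIM (what is proved, stated in full; the proofs are below) =====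
def Claim_equal_spread_domain : Prop := ∀ (domain : String), Dom_spread_domain domain → Spec_spread_domain domain (spread_domain domain)

-- ===== LEMMAS AND PROOFS =====

-- the k-part suffix of parts, joined with '.'
def pvSfx (p : List (List Char)) (k : Nat) : List Char :=
  PySem.Chars.join ['.'] (p.drop (p.length - k))

theorem pvSfx_succ (p : List (List Char)) (j : Nat) (h2 : 2 ≤ j) (hj : j < p.length) :
    pvSfx p (j + 1) = PySem.List.pyGetD p (-(j : Int) - 1) [] ++ ['.'] ++ pvSfx p j := by
  have hidx : (-(j : Int) - 1) = -(((j + 1 : Nat) : Int)) := by push_cast; ring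
  rw [pvSfx, pvSfx, hidx,
    PySem.List.pyGetD_neg_natCast p (j + 1) [] (by omega) (by omega)]
  have hlt : p.length - (j + 1) < p.length := by omega
  rw [List.drop_eq_getElem_cons hlt]
  have : p.length - (j + 1) + 1 = p.length - j := by omega
  rw [this]
  obtain ⟨q, rest, hqr⟩ : ∃ q rest, p.drop (p.length - j) = q :: rest := by
    cases hd : p.drop (p.length - j) with
    | nil => exfalso; have := congrArg List.length hd; simp at this; omega
    | cons q rest => exact ⟨q, rest, rfl⟩
  rw [hqr, PySem.Chars.join_cons_cons]

theorem pvLoop (p : List (List Char)) (c : Nat) :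
    ∀ (j : Nat) (acc : List (List Char)), 2 ≤ j → j + c = p.length →
    ((PySem.List.pyRange (-(j : Int) - 1) (-(p.length : Int) - 1) (-1)).foldl
      (fun (st : List (List Char) × List Char) i =>
        (st.1 ++ [PySem.List.pyGetD p i [] ++ ['.'] ++ st.2],
         PySem.List.pyGetD p i [] ++ ['.'] ++ st.2)) (acc, pvSfx p j)).1
    = acc ++ (PySem.List.pyRange ((j : Int) + 1) ((p.length : Int) + 1) 1).map
        (fun k => PySem.Chars.join ['.'] (p.drop (p.length - k.toNat))) := by
  induction c with
  | zero =>
    intro j acc _ hjn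
    have hj : (j : Int) = (p.length : Int) := by omega
    rw [hj, PySem.List.pyRange_neg_one_eq_nil (by omega),
      PySem.List.pyRange_one_eq_nil (by omega)]
    simp
  | succ c ih =>
    intro j acc h2 hjn
    have hjlt : j < p.length := by omega
    rw [PySem.List.pyRange_neg_one_cons (by omega)]
    rw [List.foldl_cons]
    have hstep : PySem.List.pyGetD p (-(j : Int) - 1) [] ++ ['.'] ++ pvSfx p j = pvSfx p (j + 1) :=
      (pvSfx_succ p j h2 hjlt).symm
    simp only [hstep]
    have harg : (-(j : Int) - 1 - 1) = -((j + 1 : Nat) : Int) - 1 := by push_cast; ring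
    rw [harg]
    rw [PySem.List.pyRange_one_cons (a := (j : Int) + 1) (b := (p.length : Int) + 1) (by omega)]
    rw [ih (j + 1) (acc ++ [pvSfx p (j + 1)]) (by omega) (by omega)]
    rw [List.map_cons]
    simp only [List.append_assoc, List.cons_append, List.nil_append]
    have e1 : ((j : Int) + 1).toNat = j + 1 := by omega
    have e2 : ((j + 1 : Nat) : Int) + 1 = (j : Int) + 1 + 1 := by push_cast; ring
    rw [e1, e2, pvSfx]

theorem pvBody_eq (p : List (List Char)) : spreadDomainBodyA p = spreadDomainBodyB p := by
  unfold spreadDomainBodyA spreadDomainBodyB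
  by_cases h3 : 2 < p.length
  · simp only [if_pos h3]
    have hpd0 : PySem.Chars.join ['.'] (PySem.List.slice p (some (-2)) none) = pvSfx p 2 := by
      rw [PySem.List.slice_from_neg_ofNat p 2 (by norm_num), pvSfx]
    have hstart : (-3 : Int) = -((2 : Nat) : Int) - 1 := by norm_num
    rw [hpd0, hstart, pvLoop p (p.length - 2) 2 [pvSfx p 2] (by omega) (by omega)]
    have h23 : ((2 : Nat) : Int) + 1 = (2 : Int) + 1 := by norm_num
    rw [h23]
    conv_rhs => rw [PySem.List.pyRange_one_cons (a := (2 : Int)) (b := (p.length : Int) + 1) (by omega)]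
    simp only [List.cons_append, List.nil_append, List.map_cons, List.map_map]
    congr 1
    · rw [PySem.List.slice_from_neg_ofNat p 2 (by norm_num)]
      rfl
    · apply List.map_congr_left
      intro k hk
      have hb := PySem.List.mem_pyRange_one.mp hk
      have hknat : -k = -((k.toNat : Nat) : Int) := by omega
      simp only [Function.comp]
      rw [hknat, PySem.List.slice_from_neg_natCast p k.toNat (by omega)]
  · simp only [if_neg h3]
    by_cases h2 : p.length = 2
    · simp only [if_pos h2]
      have hrange : PySem.List.pyRange 2 ((p.length : Int) + 1) 1 = [(2 : Int)] := by
        rw [h2]; rw [show ((2 : Nat) : Int) + 1 = 2 + 1 by norm_num]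
        exact PySem.List.pyRange_one_singleton 2
      rw [hrange, List.map_singleton]
      have hs : PySem.List.slice p (some (-(2 : Int))) none = p.drop (p.length - 2) :=
        PySem.List.slice_from_neg_ofNat p 2 (by norm_num)
      rw [hs, h2]
      simp
    · simp only [if_neg h2]
      rw [PySem.List.pyRange_one_eq_nil (by omega)]
      rfl

-- ===== VERDICT (by name: the statement is the Claim_ definition above) =====
theorem spread_domain_spec : Claim_equal_spread_domain := by
  intro domain _
  unfold Spec_spread_domain spread_domain spread_domain_alt
  dsimp only
  cases PySem.List.pyGet? (PySem.Chars.splitOn (PySem.Chars.strip domain.toList) ['.']) 0 with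
  | none => rfl
  | some p0 => exact pvBody_eq _
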